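-- pv_equiv track=rewrite | github.com/ItamarDayan/Beacon_calculus_applications | runSSP.py | print_partial_sums
-- ===== SOURCE A (Python) =====
-- def print_partial_sums(lst,n):
--     sum = 0
--     partial_sums = ""
--     partial_sums += "0"
--     for i in range(0,n-1):
--         sum += lst[i]
--         partial_sums += (", " + str(sum))
--
--     return partial_sums
-- ===== SOURCE B (Python) =====
-- def print_partial_sums(lst, n):
--     # back-to-front: compute the window total once, then walk backwards
--     # subtracting elements, building the parts list in reverse
--     m = max(n - 1, 0)
--     t = sum(lst[:m])
--     parts = []
--     for i in range(m, 0, -1):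
--         parts.append(str(t))
--         t -= lst[i - 1]
--     parts.append("0")
--     return ", ".join(reversed(parts))
-- ===== Notes on version B (the rewrite author's own statement) =====
-- stated objective: alternative
-- what changed: A walks the list forwards with a running sum, appending to the result string as it goes; B computes the window total once, then traverses backwards subtracting elements to recover each prefix sum, collecting the formatted parts in reverse and joining the reversed list.
import Mathlib
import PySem

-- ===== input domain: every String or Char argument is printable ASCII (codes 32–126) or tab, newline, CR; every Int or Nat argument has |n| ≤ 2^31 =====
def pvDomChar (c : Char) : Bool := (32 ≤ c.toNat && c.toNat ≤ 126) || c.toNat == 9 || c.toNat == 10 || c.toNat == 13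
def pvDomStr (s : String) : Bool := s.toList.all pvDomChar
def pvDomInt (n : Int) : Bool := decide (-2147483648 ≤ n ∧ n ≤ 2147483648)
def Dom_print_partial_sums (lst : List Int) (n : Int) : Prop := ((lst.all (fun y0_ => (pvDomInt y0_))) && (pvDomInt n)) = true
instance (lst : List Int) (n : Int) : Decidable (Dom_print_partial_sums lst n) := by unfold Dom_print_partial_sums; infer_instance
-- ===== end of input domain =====

-- A walks forwards with a running sum, concatenating as it goes; B computes the window
-- total once and walks backwards subtracting elements, collecting the formatted parts in
-- reverse and joining the reversed list (objective: alternative).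

-- ===== PORT A =====
-- sum = 0; partial_sums = "0"; for i in range(0, n-1): sum += lst[i]; partial_sums += ", " + str(sum)
-- (lst[i] is in range for every i of the loop under Pre_; pyGetD's default is never used there)
def print_partial_sums (lst : List Int) (n : Int) : String :=
  ((PySem.List.pyRange 0 (n - 1)).foldl
      (fun (st : Int × String) i =>
        (st.1 + PySem.List.pyGetD lst i 0,
         st.2 ++ ", " ++ PySem.Int.toStr (st.1 + PySem.List.pyGetD lst i 0)))
      (0, "0")).2

-- ===== PORT B =====
-- m = max(n-1,0); t = sum(lst[:m]); for i in range(m,0,-1): parts.append(str(t)); t -= lst[i-1]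
-- parts.append("0"); return ", ".join(reversed(parts))
-- (lst[i-1] is in range for every i of the loop under Pre_; pyGetD's default is never used there)
def print_partial_sums_alt (lst : List Int) (n : Int) : String :=
  PySem.Str.join ", "
    ((((PySem.List.pyRange (max (n - 1) 0) 0 (-1)).foldl
          (fun (st : Int × List String) i =>
            (st.1 - PySem.List.pyGetD lst (i - 1) 0, st.2 ++ [PySem.Int.toStr st.1]))
          ((PySem.List.slice lst (some 0) (some (max (n - 1) 0))).foldl (· + ·) 0,
           ([] : List String))).2
        ++ ["0"]).reverse)

-- ===== PRECONDITION & SPEC =====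
-- Pre_ excludes exactly the inputs where A raises IndexError: the loop reads lst[i] for i < n-1.
def Pre_print_partial_sums (lst : List Int) (n : Int) : Prop := n - 1 ≤ (lst.length : Int)
instance (lst : List Int) (n : Int) : Decidable (Pre_print_partial_sums lst n) := by
  unfold Pre_print_partial_sums; infer_instance

def pvWitness_print_partial_sums : List Int × Int := ([1, 2], 3)

def Spec_print_partial_sums (lst : List Int) (n : Int) (out : String) : Prop := out = print_partial_sums_alt lst n
instance (lst : List Int) (n : Int) (out : String) : Decidable (Spec_print_partial_sums lst n out) := by unfold Spec_print_partial_sums; infer_instance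

-- ===== CLAIM (what is proved, stated in full; the proofs are below) =====
def Claim_equal_print_partial_sums : Prop := ∀ (lst : List Int) (n : Int), Dom_print_partial_sums lst n → Pre_print_partial_sums lst n → Spec_print_partial_sums lst n (print_partial_sums lst n)

-- ===== LEMMAS AND PROOFS =====

lemma join_append_singleton (sep v : List Char) (vs : List (List Char)) (h : vs ≠ []) :
    PySem.Chars.join sep (vs ++ [v]) = PySem.Chars.join sep vs ++ sep ++ v := by
  induction vs with
  | nil => exact absurd rfl h
  | cons x rest ih =>
    cases rest with
    | nil => simp [PySem.Chars.join_cons_cons, PySem.Chars.join_singleton]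
    | cons y t =>
      rw [show (x :: y :: t) ++ [v] = x :: y :: (t ++ [v]) from rfl,
          PySem.Chars.join_cons_cons, PySem.Chars.join_cons_cons,
          show y :: (t ++ [v]) = (y :: t) ++ [v] from rfl, ih (by simp)]
      simp [List.append_assoc]

lemma take_succ_sum (lst : List Int) (k : Nat) (hk : k < lst.length) :
    (lst.take (k + 1)).foldl (· + ·) 0 = (lst.take k).foldl (· + ·) 0 + lst[k] := by
  rw [show lst.take (k + 1) = lst.take k ++ [lst[k]] by
        rw [List.take_add_one, List.getElem?_eq_getElem hk]; rfl,
      List.foldl_append]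
  rfl

-- A's loop state after k iterations: the running sum is the k-th take-sum, and the string
-- is the join of the formatted take-sums for 0..k.
lemma main_invariant (lst : List Int) (k : Nat) (hk : k ≤ lst.length) :
    (((PySem.List.pyRange 0 (k : Int)).foldl
        (fun (st : Int × String) i =>
          (st.1 + PySem.List.pyGetD lst i 0,
           st.2 ++ ", " ++ PySem.Int.toStr (st.1 + PySem.List.pyGetD lst i 0)))
        (0, "0")).1
      = (lst.take k).foldl (· + ·) 0)
    ∧ (((PySem.List.pyRange 0 (k : Int)).foldl
        (fun (st : Int × String) i =>
          (st.1 + PySem.List.pyGetD lst i 0,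
           st.2 ++ ", " ++ PySem.Int.toStr (st.1 + PySem.List.pyGetD lst i 0)))
        (0, "0")).2.toList
      = PySem.Chars.join (", ".toList)
          ((List.range (k + 1)).map
            (fun i => PySem.Int.toChars ((lst.take i).foldl (· + ·) 0)))) := by
  induction k with
  | zero =>
    refine ⟨rfl, ?_⟩
    simp [PySem.List.pyRange_one_eq_nil (le_refl (0 : Int)),
          PySem.Chars.join_singleton]
    decide
  | succ k ih =>
    have hk' : k ≤ lst.length := Nat.le_of_succ_le hk
    obtain ⟨ih1, ih2⟩ := ih hk'
    have hklt : k < lst.length := hk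
    have hrange : PySem.List.pyRange 0 ((k + 1 : Nat) : Int)
        = PySem.List.pyRange 0 (k : Int) ++ [(k : Int)] := by
      have := PySem.List.pyRange_one_succ_right (a := 0) (b := (k : Int)) (by positivity)
      rw [← this]; norm_cast
    have hget : PySem.List.pyGetD lst (k : Int) 0 = lst[k] := by
      rw [PySem.List.pyGetD_eq_getElem lst 0 (by positivity) (by exact_mod_cast hklt)]
      simp
    rw [hrange, List.foldl_append]
    simp only [List.foldl_cons, List.foldl_nil]
    refine ⟨by rw [ih1, hget, ← take_succ_sum lst k hklt], ?_⟩
    rw [show List.range (k + 1 + 1) = List.range (k + 1) ++ [k + 1] from List.range_succ,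
        List.map_append, List.map_cons, List.map_nil,
        join_append_singleton _ _ _ (by simp)]
    simp only [String.toList_append, ih2, ih1, hget, PySem.Int.toList_toStr,
      take_succ_sum lst k hklt]

-- B's countdown loop, run from the m-th take-sum, ends at 0 and appends the formatted
-- take-sums for m, m-1, …, 1 to the accumulator.
lemma back_invariant (lst : List Int) (m : Nat) (hm : m ≤ lst.length) (acc : List String) :
    (PySem.List.pyRange (m : Int) 0 (-1)).foldl
        (fun (st : Int × List String) i =>
          (st.1 - PySem.List.pyGetD lst (i - 1) 0, st.2 ++ [PySem.Int.toStr st.1]))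
        ((lst.take m).foldl (· + ·) 0, acc)
      = (0, acc ++ (List.range m).map
          (fun j => PySem.Int.toStr ((lst.take (m - j)).foldl (· + ·) 0))) := by
  induction m generalizing acc with
  | zero =>
    rw [PySem.List.pyRange_neg_one_eq_nil (by norm_num)]
    simp
  | succ m ih =>
    have hm' : m ≤ lst.length := Nat.le_of_succ_le hm
    have hmlt : m < lst.length := hm
    have hcons : PySem.List.pyRange ((m + 1 : Nat) : Int) 0 (-1)
        = ((m + 1 : Nat) : Int) :: PySem.List.pyRange (((m + 1 : Nat) : Int) - 1) 0 (-1) := by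
      exact PySem.List.pyRange_neg_one_cons (by positivity)
    rw [hcons]
    simp only [List.foldl_cons]
    have hm1 : ((m + 1 : Nat) : Int) - 1 = (m : Int) := by push_cast; ring
    have hget : PySem.List.pyGetD lst ((m : Nat) : Int) 0 = lst[m] := by
      rw [PySem.List.pyGetD_eq_getElem lst 0 (by positivity) (by exact_mod_cast hmlt)]
      simp
    rw [hm1, hget, take_succ_sum lst m hmlt, show
        (lst.take m).foldl (· + ·) 0 + lst[m] - lst[m] = (lst.take m).foldl (· + ·) 0 by ring,
      ih hm']
    rw [show List.range (m + 1) = 0 :: (List.range m).map Nat.succ from List.range_succ_eq_map]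
    simp only [List.map_cons, List.map_map, Nat.sub_zero, List.append_assoc,
      List.singleton_append]
    congr 1
    rw [take_succ_sum lst m hmlt, List.append_right_inj]
    refine List.cons_eq_cons.mpr ⟨rfl, ?_⟩
    apply List.map_congr_left
    intro j hj
    simp [Nat.succ_sub_succ]

-- reversing a descending-indexed table gives the ascending one
lemma reverse_map_range_sub {α : Type} (f : Nat → α) (k : Nat) :
    ((List.range k).map (fun j => f (k - j))).reverse = (List.range k).map (fun j => f (j + 1)) := by
  induction k generalizing f with
  | zero => simp
  | succ k ih =>
    conv_lhs => rw [List.range_succ]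
    conv_rhs => rw [List.range_succ_eq_map]
    rw [List.map_append, List.reverse_append]
    simp only [List.map_cons, List.map_nil, List.reverse_cons, List.reverse_nil,
      List.nil_append, List.map_map, Nat.add_sub_cancel_left]
    have h1 : (List.range k).map (fun j => f (k + 1 - j))
        = (List.range k).map (fun j => (fun i => f (i + 1)) (k - j)) := by
      apply List.map_congr_left
      intro j hj
      have : j < k := List.mem_range.mp hj
      congr 1
      omega
    rw [h1, ih (fun i => f (i + 1))]
    simp [Function.comp_def]

-- ===== VERDICT (by name: the statement is the Claim_ definition above) =====
theorem print_partial_sums_spec : Claim_equal_print_partial_sums := by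
  intro lst n _ hpre
  unfold Pre_print_partial_sums at hpre
  unfold Spec_print_partial_sums print_partial_sums print_partial_sums_alt
  apply String.toList_inj.mp
  rw [PySem.Str.toList_join]
  set k : Nat := (n - 1).toNat with hkdef
  have hmax : max (n - 1) 0 = (k : Int) := by omega
  have hklen : k ≤ lst.length := by omega
  have hArange : PySem.List.pyRange 0 (n - 1) = PySem.List.pyRange 0 (k : Int) := by
    by_cases h : n - 1 ≤ 0
    · rw [PySem.List.pyRange_one_eq_nil h, PySem.List.pyRange_one_eq_nil (by omega)]
    · congr 1; omega
  obtain ⟨_, h2⟩ := main_invariant lst k hklen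
  rw [hArange, h2, hmax]
  have hslice : PySem.List.slice lst (some 0) (some (k : Int)) = lst.take k := by
    have h := PySem.List.slice_natCast lst 0 k
    rw [Nat.cast_zero] at h
    rw [h]; simp
  have hmapped : List.map String.toList
        ((List.map (fun j => PySem.Int.toStr ((lst.take (k - j)).foldl (· + ·) 0))
          (List.range k)).reverse)
      = List.map (fun j => PySem.Int.toChars ((lst.take (j + 1)).foldl (· + ·) 0))
          (List.range k) := by
    rw [List.map_reverse, List.map_map,
        show String.toList ∘ (fun j => PySem.Int.toStr ((lst.take (k - j)).foldl (· + ·) 0))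
          = fun j => (fun i => PySem.Int.toChars ((lst.take i).foldl (· + ·) 0)) (k - j) from
          funext (fun j => PySem.Int.toList_toStr _)]
    exact reverse_map_range_sub (fun i => PySem.Int.toChars ((lst.take i).foldl (· + ·) 0)) k
  rw [hslice, back_invariant lst k hklen [], List.nil_append,
      show List.range (k + 1) = 0 :: (List.range k).map Nat.succ from List.range_succ_eq_map]
  simp only [List.reverse_append, List.reverse_cons, List.reverse_nil, List.nil_append,
    List.singleton_append, List.map_cons, List.map_map, List.take_zero, List.foldl_nil]
  rw [hmapped]
  have h0 : PySem.Int.toChars 0 = "0".toList := by decide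
  rw [h0]
  congr 1
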